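-- pv_equiv track=rewrite | github.com/patelnav/Fractal | research-log/phase18-fractal-coder/fractal_coder.py | execute_program
-- ===== SOURCE A (Python) =====
-- from typing import List, Tuple, Optional
--
-- def execute_program(text_parts: List[str]) -> Tuple[bool, int, int]:
--     """
--     Execute the synthetic program.
--     Returns (Success, Result, FailingIndex).
--     """
--     current_val = 0
--     full_program = "".join(text_parts)
--
--     # Parse and execute step by step to find error
--     # Format: "+ 5", "* 2" (each 4 chars)
--
--     for i, part in enumerate(text_parts):
--         part = part.strip()
--         if not part: continue
--
--         op = part[0]
--         try:
--             val = int(part[1:])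
--         except ValueError:
--             return False, current_val, i # Syntax error
--
--         if op == '+':
--             current_val += val
--         elif op == '-':
--             current_val -= val
--         elif op == '*':
--             current_val *= val
--         else:
--             return False, current_val, i # Invalid op
--
--     return True, current_val, -1
-- ===== SOURCE B (Python) =====
-- from typing import List, Tuple
--
--
-- def execute_program(text_parts: List[str]) -> Tuple[bool, int, int]:
--     # Phase 1: parse -- collect the valid (op, val) prefix, note the first bad index.
--     ops = []
--     bad = -1
--     for i, part in enumerate(text_parts):
--         p = part.strip()
--         if not p:
--             continue
--         op = p[0]
--         try:
--             val = int(p[1:])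
--         except ValueError:
--             bad = i
--             break
--         if op != '+' and op != '-' and op != '*':
--             bad = i
--             break
--         ops.append((op, val))
--     # Phase 2: evaluate the collected operations.
--     acc = 0
--     for op, val in ops:
--         if op == '+':
--             acc += val
--         elif op == '-':
--             acc -= val
--         else:
--             acc *= val
--     return bad == -1, acc, bad
-- ===== Notes on version B (the rewrite author's own statement) =====
-- stated objective: alternative
-- what changed: B splits A's single interleaved loop into a parsing pass that collects the valid (op, val) prefix and records the first failing index, followed by a separate fold that evaluates the collected operations.
import Mathlib
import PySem

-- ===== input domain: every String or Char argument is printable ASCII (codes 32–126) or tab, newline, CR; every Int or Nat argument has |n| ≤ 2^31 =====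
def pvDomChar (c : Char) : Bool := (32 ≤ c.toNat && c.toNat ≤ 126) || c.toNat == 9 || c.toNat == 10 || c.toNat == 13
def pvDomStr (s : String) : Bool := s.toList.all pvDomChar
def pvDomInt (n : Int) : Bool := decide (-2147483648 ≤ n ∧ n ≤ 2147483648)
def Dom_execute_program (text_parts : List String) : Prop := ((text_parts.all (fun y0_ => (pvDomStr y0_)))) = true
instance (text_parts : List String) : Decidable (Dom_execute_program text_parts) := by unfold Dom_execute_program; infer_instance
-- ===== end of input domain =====

-- B replaces A's single interleaved loop by a parse pass (collect valid ops, note first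
-- bad index) followed by an evaluation fold; same values on every input (alternative).

-- ===== PORT A =====
-- the single loop of A: state = current_val, early return on a bad part
def executeProgramLoop : List (Int × String) → Int → Bool × Int × Int
  | [], cur => (true, cur, -1)
  | (i, part0) :: rest, cur =>
    let part := PySem.Str.strip part0
    match part.toList with
    | [] => executeProgramLoop rest cur            -- if not part: continue
    | op :: tl =>                                  -- op = part[0]; part[1:] = tl
      match PySem.Int.ofChars? tl with             -- val = int(part[1:])
      | none => (false, cur, i)                    -- ValueError → syntax error
      | some v =>
        if op = '+' then executeProgramLoop rest (cur + v)
        else if op = '-' then executeProgramLoop rest (cur - v)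
        else if op = '*' then executeProgramLoop rest (cur * v)
        else (false, cur, i)                       -- invalid op

def execute_program (text_parts : List String) : Bool × Int × Int :=
  let _full_program := PySem.Str.join "" text_parts   -- computed but unused, as in A
  executeProgramLoop (PySem.List.enumerate text_parts 0) 0

-- ===== PORT B =====
-- phase 1 of B: collect the valid (op, val) prefix and the first bad index (-1 if none)
def altParse : List (Int × String) → List (Char × Int) × Int
  | [] => ([], -1)
  | (i, part0) :: rest =>
    let p := PySem.Str.strip part0
    match p.toList with
    | [] => altParse rest
    | op :: tl =>
      match PySem.Int.ofChars? tl with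
      | none => ([], i)
      | some v =>
        if op ≠ '+' ∧ op ≠ '-' ∧ op ≠ '*' then ([], i)
        else
          let (ops, bad) := altParse rest
          ((op, v) :: ops, bad)

-- phase 2 of B: fold the operations into the accumulator
def altEval (acc : Int) : List (Char × Int) → Int
  | [] => acc
  | (op, v) :: rest =>
    altEval (if op = '+' then acc + v else if op = '-' then acc - v else acc * v) rest

def execute_program_alt (text_parts : List String) : Bool × Int × Int :=
  let r := altParse (PySem.List.enumerate text_parts 0)
  (r.2 == -1, altEval 0 r.1, r.2)

-- ===== PRECONDITION & SPEC =====
def Spec_execute_program (text_parts : List String) (out : Bool × Int × Int) : Prop := out = execute_program_alt text_parts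
instance (text_parts : List String) (out : Bool × Int × Int) : Decidable (Spec_execute_program text_parts out) := by unfold Spec_execute_program; infer_instance

-- ===== CLAIM (what is proved, stated in full; the proofs are below) =====
def Claim_equal_execute_program : Prop := ∀ (text_parts : List String), Dom_execute_program text_parts → Spec_execute_program text_parts (execute_program text_parts)

-- ===== LEMMAS AND PROOFS =====

-- indices produced by enumerate from a nonnegative start are nonnegative
theorem enumerate_fst_nonneg (xs : List String) : ∀ (s : Int), 0 ≤ s →
    ∀ p ∈ PySem.List.enumerate xs s, 0 ≤ p.1 := by
  induction xs with
  | nil => simp [PySem.List.enumerate_nil]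
  | cons x xs ih =>
    intro s hs p hp
    rw [PySem.List.enumerate_cons, List.mem_cons] at hp
    rcases hp with hp | hp
    · subst hp; exact hs
    · exact ih (s + 1) (by omega) p hp

-- A's loop equals B's parse-then-eval, for any accumulator, on lists of nonneg indices
theorem loop_eq_parse_eval (l : List (Int × String)) (h : ∀ p ∈ l, 0 ≤ p.1) :
    ∀ cur : Int,
      executeProgramLoop l cur =
        ((altParse l).2 == -1, altEval cur (altParse l).1, (altParse l).2) := by
  induction l with
  | nil => intro cur; simp [executeProgramLoop, altParse, altEval]
  | cons hd rest ih =>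
    intro cur
    obtain ⟨i, part0⟩ := hd
    have hi : (0:Int) ≤ i := h (i, part0) (by simp)
    have hrest : ∀ p ∈ rest, 0 ≤ p.1 := fun p hp => h p (by simp [hp])
    have hne : (i == (-1 : Int)) = false := by
      simp only [beq_eq_false_iff_ne]; omega
    simp only [executeProgramLoop, altParse]
    cases hcl : (PySem.Str.strip part0).toList with
    | nil => exact ih hrest cur
    | cons op tl =>
      cases hv : PySem.Int.ofChars? tl with
      | none => simp [hv, hne, altEval]
      | some v =>
        by_cases hop : op ≠ '+' ∧ op ≠ '-' ∧ op ≠ '*'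
        · simp [hv, hop, hne, altEval]
        · simp only [hv, if_neg hop]
          push Not at hop
          by_cases hp : op = '+'
          · subst hp; simp [altEval, ih hrest (cur + v)]
          · by_cases hm : op = '-'
            · subst hm; simp [hp, altEval, ih hrest (cur - v)]
            · have hs : op = '*' := hop hp hm
              subst hs
              simp [altEval, ih hrest (cur * v)]

-- ===== VERDICT (by name: the statement is the Claim_ definition above) =====
theorem execute_program_spec : Claim_equal_execute_program := by
  intro text_parts _
  unfold Spec_execute_program execute_program execute_program_alt
  exact loop_eq_parse_eval (PySem.List.enumerate text_parts 0)
    (enumerate_fst_nonneg text_parts 0 le_rfl) 0
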